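-- pv_equiv track=rewrite | github.com/pvv421/Advanced-DSA-Training-Programs | Day13/TournamentMethod.py | maxAndSequence
-- ===== SOURCE A (Python) =====
-- def maxAndSequence(lo, hi, seq):
--         if lo >= hi:
--             return seq[lo], []
--         mid = lo + (hi - lo) // 2
--         x, a = maxAndSequence(lo, mid, seq)
--         y, b = maxAndSequence(mid + 1, hi, seq)
--
--         if x > y:
--             a.append(y)
--             return x, a
--         b.append(x)
--         return y, b
-- ===== SOURCE B (Python) =====
-- def maxAndSequence(lo, hi, seq):
--     # iterative explicit-stack post-order traversal instead of recursion
--     work = [("range", lo, hi)]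
--     results = []
--     while work:
--         frame = work.pop()
--         if frame[0] == "range":
--             _, l, h = frame
--             if l >= h:
--                 results.append((seq[l], []))
--             else:
--                 mid = l + (h - l) // 2
--                 work.append(("combine", 0, 0))
--                 work.append(("range", mid + 1, h))
--                 work.append(("range", l, mid))
--         else:
--             y, b = results.pop()
--             x, a = results.pop()
--             if x > y:
--                 a.append(y)
--                 results.append((x, a))
--             else:
--                 b.append(x)
--                 results.append((y, b))
--     return results[-1]
-- ===== Notes on version B (the rewrite author's own statement) =====
-- stated objective: alternative
-- what changed: Replaces A's divide-and-conquer recursion by an iterative post-order traversal with an explicit work stack of range/combine frames and a results stack.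
import Mathlib
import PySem

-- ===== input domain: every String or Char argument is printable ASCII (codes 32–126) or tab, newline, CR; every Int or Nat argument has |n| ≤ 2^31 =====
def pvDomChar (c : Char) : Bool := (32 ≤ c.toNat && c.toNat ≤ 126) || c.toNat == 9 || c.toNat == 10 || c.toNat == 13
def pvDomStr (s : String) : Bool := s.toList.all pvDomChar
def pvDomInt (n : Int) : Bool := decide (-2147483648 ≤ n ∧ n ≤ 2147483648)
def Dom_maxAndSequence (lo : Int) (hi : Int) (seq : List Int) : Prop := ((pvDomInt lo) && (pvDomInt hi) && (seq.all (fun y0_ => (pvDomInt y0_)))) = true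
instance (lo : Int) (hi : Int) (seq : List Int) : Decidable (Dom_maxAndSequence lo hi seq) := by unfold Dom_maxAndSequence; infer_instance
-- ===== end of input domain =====

-- B replaces A's divide-and-conquer recursion by an iterative post-order traversal with an
-- explicit work stack of range/combine frames and a results stack (same cost, different
-- control structure); equivalence is about return values on inputs where A does not raise.

-- ===== PORT A =====
-- literal port of A's recursion; the Nat fuel ((hi-lo).toNat + 1, always sufficient) only
-- makes the recursion structural; seq[lo] is pyGet?, whose `none` (IndexError) case returns
-- a junk value and is excluded by Pre_maxAndSequence.
def maxASeqF : Nat → Int → Int → List Int → Int × List Int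
  | 0, _, _, _ => (0, [])  -- fuel guard only; unreachable from maxAndSequence
  | f + 1, lo, hi, seq =>
    if lo ≥ hi then ((PySem.List.pyGet? seq lo).getD 0, [])
    else
      let mid := lo + PySem.Int.floordiv (hi - lo) 2
      let xa := maxASeqF f lo mid seq
      let yb := maxASeqF f (mid + 1) hi seq
      if xa.1 > yb.1 then (xa.1, xa.2 ++ [yb.1]) else (yb.1, yb.2 ++ [xa.1])

def maxAndSequence (lo : Int) (hi : Int) (seq : List Int) : Int × List Int :=
  maxASeqF ((hi - lo).toNat + 1) lo hi seq

-- ===== PORT B =====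
inductive PvFrame where
  | range : Int → Int → PvFrame
  | combine : PvFrame
deriving DecidableEq, Repr

-- the while loop of Source B; `work`/`results` are the two stacks (head = top); the Nat fuel
-- (4 ^ (hi-lo).toNat bounds the number of loop iterations) only makes the loop structural
def pvRunF : Nat → List PvFrame → List (Int × List Int) → List Int → List (Int × List Int)
  | 0, _, results, _ => results  -- fuel guard only; unreachable from maxAndSequence_alt
  | f + 1, work, results, seq =>
    match work with
    | [] => results
    | .range l h :: fs =>
        if l ≥ h then pvRunF f fs (((PySem.List.pyGet? seq l).getD 0, []) :: results) seq
        else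
          let mid := l + PySem.Int.floordiv (h - l) 2
          pvRunF f (.range l mid :: .range (mid + 1) h :: .combine :: fs) results seq
    | .combine :: fs =>
        match results with
        | (y, b) :: (x, a) :: rs =>
            if x > y then pvRunF f fs ((x, a ++ [y]) :: rs) seq
            else pvRunF f fs ((y, b ++ [x]) :: rs) seq
        | _ => results  -- unreachable from maxAndSequence_alt (results.pop() on a short stack)

def maxAndSequence_alt (lo : Int) (hi : Int) (seq : List Int) : Int × List Int :=
  (pvRunF (4 ^ (hi - lo).toNat) [.range lo hi] [] seq).headD (0, [])

-- ===== PRECONDITION & SPEC =====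
-- Pre_ excludes exactly the inputs on which Python A raises IndexError at seq[lo]:
-- some accessed leaf index (lo alone if lo ≥ hi, else every index in [lo, hi]) is out of range.
def Pre_maxAndSequence (lo : Int) (hi : Int) (seq : List Int) : Prop :=
  -(seq.length : Int) ≤ lo ∧ (if lo < hi then hi < (seq.length : Int) else lo < (seq.length : Int))
instance (lo : Int) (hi : Int) (seq : List Int) : Decidable (Pre_maxAndSequence lo hi seq) := by
  unfold Pre_maxAndSequence; infer_instance

def pvWitness_maxAndSequence : Int × Int × List Int := (0, 3, [3, 1, 4, 1])

def Spec_maxAndSequence (lo : Int) (hi : Int) (seq : List Int) (out : Int × List Int) : Prop := out = maxAndSequence_alt lo hi seq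
instance (lo : Int) (hi : Int) (seq : List Int) (out : Int × List Int) : Decidable (Spec_maxAndSequence lo hi seq out) := by unfold Spec_maxAndSequence; infer_instance

-- ===== CLAIM (what is proved, stated in full; the proofs are below) =====
def Claim_equal_maxAndSequence : Prop := ∀ (lo : Int) (hi : Int) (seq : List Int), Dom_maxAndSequence lo hi seq → Pre_maxAndSequence lo hi seq → Spec_maxAndSequence lo hi seq (maxAndSequence lo hi seq)

-- ===== LEMMAS AND PROOFS =====

def pvWeight : PvFrame → Nat
  | .range l h => 4 ^ (h - l).toNat
  | .combine => 1

def pvMeasure (work : List PvFrame) : Nat := (work.map pvWeight).sum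

theorem pvWeight_pos (fr : PvFrame) : 1 ≤ pvWeight fr := by
  cases fr <;> simp [pvWeight, Nat.one_le_pow]

theorem pvMeasure_cons (fr : PvFrame) (fs : List PvFrame) :
    pvMeasure (fr :: fs) = pvWeight fr + pvMeasure fs := by
  simp [pvMeasure]

theorem pvDecL (lo hi : Int) (h : lo < hi) :
    (lo + PySem.Int.floordiv (hi - lo) 2 - lo).toNat < (hi - lo).toNat := by
  have h2 : PySem.Int.floordiv (hi - lo) 2 = (hi - lo) / 2 :=
    PySem.Int.floordiv_eq_ediv_of_pos (by omega)
  omega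

theorem pvDecR (lo hi : Int) (h : lo < hi) :
    (hi - (lo + PySem.Int.floordiv (hi - lo) 2 + 1)).toNat < (hi - lo).toNat := by
  have h2 : PySem.Int.floordiv (hi - lo) 2 = (hi - lo) / 2 :=
    PySem.Int.floordiv_eq_ediv_of_pos (by omega)
  omega

theorem pvMeasSplit (l h : Int) (S : Nat) (hlh : l < h) :
    4 ^ (l + PySem.Int.floordiv (h - l) 2 - l).toNat +
      (4 ^ (h - (l + PySem.Int.floordiv (h - l) 2 + 1)).toNat + (1 + S)) <
      4 ^ (h - l).toNat + S := by
  have ha : (l + PySem.Int.floordiv (h - l) 2 - l).toNat ≤ (h - l).toNat - 1 := by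
    have := pvDecL l h hlh; omega
  have hb : (h - (l + PySem.Int.floordiv (h - l) 2 + 1)).toNat ≤ (h - l).toNat - 1 := by
    have := pvDecR l h hlh; omega
  have pa : 4 ^ (l + PySem.Int.floordiv (h - l) 2 - l).toNat ≤ 4 ^ ((h - l).toNat - 1) :=
    Nat.pow_le_pow_right (by omega) ha
  have pb : 4 ^ (h - (l + PySem.Int.floordiv (h - l) 2 + 1)).toNat ≤ 4 ^ ((h - l).toNat - 1) :=
    Nat.pow_le_pow_right (by omega) hb
  have hpos : 1 ≤ 4 ^ ((h - l).toNat - 1) := Nat.one_le_pow _ _ (by omega)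
  have h4 : 4 ^ (h - l).toNat = 4 * 4 ^ ((h - l).toNat - 1) := by
    have hn : 1 ≤ (h - l).toNat := by omega
    conv_lhs => rw [show (h - l).toNat = ((h - l).toNat - 1) + 1 by omega]
    rw [pow_succ]; ring
  omega

-- A's fuelled recursion ignores the fuel as soon as it exceeds the range size
theorem maxASeqF_irrel (seq : List Int) :
    ∀ (n f g : Nat) (l h : Int), (h - l).toNat ≤ n → (h - l).toNat < f → (h - l).toNat < g →
      maxASeqF f l h seq = maxASeqF g l h seq := by
  intro n
  induction n with
  | zero =>
      intro f g l h hn hf hg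
      obtain ⟨f', rfl⟩ : ∃ f', f = f' + 1 := ⟨f - 1, by omega⟩
      obtain ⟨g', rfl⟩ : ∃ g', g = g' + 1 := ⟨g - 1, by omega⟩
      have hlh : l ≥ h := by omega
      simp [maxASeqF, hlh]
  | succ n ih =>
      intro f g l h hn hf hg
      obtain ⟨f', rfl⟩ : ∃ f', f = f' + 1 := ⟨f - 1, by omega⟩
      obtain ⟨g', rfl⟩ : ∃ g', g = g' + 1 := ⟨g - 1, by omega⟩
      by_cases hlh : l ≥ h
      · simp [maxASeqF, hlh]
      · have hL := pvDecL l h (by omega)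
        have hR := pvDecR l h (by omega)
        simp only [maxASeqF, hlh, if_false]
        rw [ih f' g' l (l + PySem.Int.floordiv (h - l) 2) (by omega) (by omega) (by omega),
            ih f' g' (l + PySem.Int.floordiv (h - l) 2 + 1) h (by omega) (by omega) (by omega)]

-- one unfolding of A on a non-trivial range, phrased with A itself in the children
theorem maxA_step (l h : Int) (seq : List Int) (hlh : l < h) :
    maxAndSequence l h seq =
      (if (maxAndSequence l (l + PySem.Int.floordiv (h - l) 2) seq).1 >
          (maxAndSequence (l + PySem.Int.floordiv (h - l) 2 + 1) h seq).1 then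
        ((maxAndSequence l (l + PySem.Int.floordiv (h - l) 2) seq).1,
         (maxAndSequence l (l + PySem.Int.floordiv (h - l) 2) seq).2 ++
           [(maxAndSequence (l + PySem.Int.floordiv (h - l) 2 + 1) h seq).1])
       else
        ((maxAndSequence (l + PySem.Int.floordiv (h - l) 2 + 1) h seq).1,
         (maxAndSequence (l + PySem.Int.floordiv (h - l) 2 + 1) h seq).2 ++
           [(maxAndSequence l (l + PySem.Int.floordiv (h - l) 2) seq).1])) := by
  have hL := pvDecL l h hlh
  have hR := pvDecR l h hlh
  unfold maxAndSequence
  conv_lhs => rw [maxASeqF]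
  rw [if_neg (by omega : ¬ l ≥ h)]
  rw [show maxASeqF ((l + PySem.Int.floordiv (h - l) 2 - l).toNat + 1)
        l (l + PySem.Int.floordiv (h - l) 2) seq =
      maxASeqF (h - l).toNat l (l + PySem.Int.floordiv (h - l) 2) seq from
    maxASeqF_irrel seq (h - l).toNat _ _ l (l + PySem.Int.floordiv (h - l) 2)
      (by omega) (by omega) (by omega)]
  rw [show maxASeqF ((h - (l + PySem.Int.floordiv (h - l) 2 + 1)).toNat + 1)
        (l + PySem.Int.floordiv (h - l) 2 + 1) h seq =
      maxASeqF (h - l).toNat (l + PySem.Int.floordiv (h - l) 2 + 1) h seq from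
    maxASeqF_irrel seq (h - l).toNat _ _ (l + PySem.Int.floordiv (h - l) 2 + 1) h
      (by omega) (by omega) (by omega)]

theorem pvRunF_nil (f : Nat) (rs : List (Int × List Int)) (seq : List Int) :
    pvRunF f [] rs seq = rs := by
  cases f <;> simp [pvRunF]

-- B's fuelled loop ignores the fuel as soon as it exceeds the stack measure
theorem pvRunF_irrel (seq : List Int) :
    ∀ (f g : Nat) (work : List PvFrame) (rs : List (Int × List Int)),
      pvMeasure work ≤ f → pvMeasure work ≤ g →
      pvRunF f work rs seq = pvRunF g work rs seq := by
  intro f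
  induction f using Nat.strong_induction_on with
  | _ f ih =>
    intro g work rs hf hg
    cases work with
    | nil => rw [pvRunF_nil, pvRunF_nil]
    | cons fr fs =>
      have hw : 1 ≤ pvWeight fr := pvWeight_pos fr
      have hm := pvMeasure_cons fr fs
      obtain ⟨f', rfl⟩ : ∃ f', f = f' + 1 := ⟨f - 1, by omega⟩
      obtain ⟨g', rfl⟩ : ∃ g', g = g' + 1 := ⟨g - 1, by omega⟩
      cases fr with
      | range l h =>
        by_cases hlh : l ≥ h
        · simp only [pvRunF, hlh, if_true]
          exact ih f' (by omega) g' _ _ (by omega) (by omega)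
        · simp only [pvRunF, hlh, if_false]
          have hsplit := pvMeasSplit l h (pvMeasure fs) (by omega)
          have hpa : 1 ≤ 4 ^ (l + PySem.Int.floordiv (h - l) 2 - l).toNat :=
            Nat.one_le_pow _ _ (by omega)
          have hpb : 1 ≤ 4 ^ (h - (l + PySem.Int.floordiv (h - l) 2 + 1)).toNat :=
            Nat.one_le_pow _ _ (by omega)
          have hm' : pvMeasure (.range l (l + PySem.Int.floordiv (h - l) 2) ::
              .range (l + PySem.Int.floordiv (h - l) 2 + 1) h :: .combine :: fs) =
              4 ^ (l + PySem.Int.floordiv (h - l) 2 - l).toNat +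
                (4 ^ (h - (l + PySem.Int.floordiv (h - l) 2 + 1)).toNat + (1 + pvMeasure fs)) := by
            simp [pvMeasure, pvWeight]
          have hmr : pvMeasure (PvFrame.range l h :: fs) = 4 ^ (h - l).toNat + pvMeasure fs := by
            simp [pvMeasure, pvWeight]
          exact ih f' (by omega) g' _ _ (by omega) (by omega)
      | combine =>
        have hcm : pvMeasure (PvFrame.combine :: fs) = 1 + pvMeasure fs := by
          simp [pvMeasure, pvWeight]
        match rs with
        | (y, b) :: (x, a) :: rs' =>
          simp only [pvRunF]
          by_cases hxy : x > y <;> simp only [hxy, if_true, if_false] <;>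
            exact ih f' (by omega) g' _ _ (by omega) (by omega)
        | [] => simp only [pvRunF]
        | [p] => simp only [pvRunF]

-- processing a range frame on top of any work stack pushes exactly A's result for that
-- range onto the results stack (strong induction on the range size)
theorem pvRunF_range (seq : List Int) :
    ∀ (n : Nat) (l h : Int), (h - l).toNat ≤ n →
      ∀ (f : Nat) (fs : List PvFrame) (rs : List (Int × List Int)),
        pvMeasure (.range l h :: fs) ≤ f →
        pvRunF f (.range l h :: fs) rs seq = pvRunF f fs (maxAndSequence l h seq :: rs) seq := by
  intro n
  induction n with
  | zero =>
      intro l h hn f fs rs hf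
      have hw : 1 ≤ pvWeight (PvFrame.range l h) := pvWeight_pos _
      have hm := pvMeasure_cons (PvFrame.range l h) fs
      obtain ⟨f', rfl⟩ : ∃ f', f = f' + 1 := ⟨f - 1, by omega⟩
      have hlh : l ≥ h := by omega
      have hA : maxAndSequence l h seq = ((PySem.List.pyGet? seq l).getD 0, []) := by
        unfold maxAndSequence
        rw [maxASeqF, if_pos hlh]
      simp only [pvRunF, hlh, if_true, hA]
      exact pvRunF_irrel seq f' (f' + 1) fs _ (by omega) (by omega)
  | succ n ih =>
      intro l h hn f fs rs hf
      have hw : 1 ≤ pvWeight (PvFrame.range l h) := pvWeight_pos _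
      have hm := pvMeasure_cons (PvFrame.range l h) fs
      obtain ⟨f', rfl⟩ : ∃ f', f = f' + 1 := ⟨f - 1, by omega⟩
      by_cases hlh : l ≥ h
      · have hA : maxAndSequence l h seq = ((PySem.List.pyGet? seq l).getD 0, []) := by
          unfold maxAndSequence
          rw [maxASeqF, if_pos hlh]
        simp only [pvRunF, hlh, if_true, hA]
        exact pvRunF_irrel seq f' (f' + 1) fs _ (by omega) (by omega)
      · have hL := pvDecL l h (by omega)
        have hR := pvDecR l h (by omega)
        have hsplit := pvMeasSplit l h (pvMeasure fs) (by omega)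
        have hpa : 1 ≤ 4 ^ (l + PySem.Int.floordiv (h - l) 2 - l).toNat :=
          Nat.one_le_pow _ _ (by omega)
        have hpb : 1 ≤ 4 ^ (h - (l + PySem.Int.floordiv (h - l) 2 + 1)).toNat :=
          Nat.one_le_pow _ _ (by omega)
        have hmr : pvMeasure (PvFrame.range l h :: fs) = 4 ^ (h - l).toNat + pvMeasure fs := by
          simp [pvMeasure, pvWeight]
        have hm2 : pvMeasure (.range (l + PySem.Int.floordiv (h - l) 2 + 1) h :: .combine :: fs) =
            4 ^ (h - (l + PySem.Int.floordiv (h - l) 2 + 1)).toNat + (1 + pvMeasure fs) := by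
          simp [pvMeasure, pvWeight]
        have hm1 : pvMeasure (.range l (l + PySem.Int.floordiv (h - l) 2) ::
            .range (l + PySem.Int.floordiv (h - l) 2 + 1) h :: .combine :: fs) =
            4 ^ (l + PySem.Int.floordiv (h - l) 2 - l).toNat +
              (4 ^ (h - (l + PySem.Int.floordiv (h - l) 2 + 1)).toNat + (1 + pvMeasure fs)) := by
          simp [pvMeasure, pvWeight]
        have h41 : 4 ^ 1 ≤ 4 ^ (h - l).toNat := Nat.pow_le_pow_right (by omega) (by omega)
        have hf' : pvMeasure (.range l (l + PySem.Int.floordiv (h - l) 2) ::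
            .range (l + PySem.Int.floordiv (h - l) 2 + 1) h :: .combine :: fs) ≤ f' := by
          rw [hm1]; rw [hmr] at hf; omega
        have hf2 : pvMeasure (.range (l + PySem.Int.floordiv (h - l) 2 + 1) h ::
            .combine :: fs) ≤ f' := by
          rw [hm2]; rw [hmr] at hf; omega
        have hfS : pvMeasure fs + 3 ≤ f' := by rw [hmr] at hf; omega
        simp only [pvRunF, hlh, if_false]
        rw [ih l (l + PySem.Int.floordiv (h - l) 2) (by omega) f'
              (.range (l + PySem.Int.floordiv (h - l) 2 + 1) h :: .combine :: fs) rs hf']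
        rw [ih (l + PySem.Int.floordiv (h - l) 2 + 1) h (by omega) f' (.combine :: fs) _ hf2]
        obtain ⟨f'', rfl⟩ : ∃ f'', f' = f'' + 1 := ⟨f' - 1, by omega⟩
        simp only [pvRunF]
        rw [maxA_step l h seq (by omega)]
        by_cases hxy : (maxAndSequence l (l + PySem.Int.floordiv (h - l) 2) seq).1 >
            (maxAndSequence (l + PySem.Int.floordiv (h - l) 2 + 1) h seq).1
        · simp only [hxy, if_true]
          exact pvRunF_irrel seq f'' (f'' + 1 + 1) fs _ (by omega) (by omega)
        · simp only [hxy, if_false]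
          exact pvRunF_irrel seq f'' (f'' + 1 + 1) fs _ (by omega) (by omega)

theorem pvWitness_ok : Dom_maxAndSequence pvWitness_maxAndSequence.1 pvWitness_maxAndSequence.2.1 pvWitness_maxAndSequence.2.2 ∧ Pre_maxAndSequence pvWitness_maxAndSequence.1 pvWitness_maxAndSequence.2.1 pvWitness_maxAndSequence.2.2 := by
  decide

-- ===== VERDICT (by name: the statement is the Claim_ definition above) =====
theorem maxAndSequence_spec : Claim_equal_maxAndSequence := by
  intro lo hi seq _ _
  unfold Spec_maxAndSequence maxAndSequence_alt
  have hmeas : pvMeasure [.range lo hi] ≤ 4 ^ (hi - lo).toNat := by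
    simp [pvMeasure, pvWeight]
  rw [pvRunF_range seq (hi - lo).toNat lo hi le_rfl (4 ^ (hi - lo).toNat) [] [] hmeas,
      pvRunF_nil]
  rfl
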